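-- pv_equiv track=rewrite | github.com/Hoodythree/LeetCode_By_Tag | Data_Structure_and_Alogrithm/int_break.py | integer_breaking
-- ===== SOURCE A (Python) =====
-- def integer_breaking(num):
--     dynamic_programming = [1 for i in range(num + 1)]
--     for i in range(1, num + 1):
--         if i % 2 == 1:
--             dynamic_programming[i] = dynamic_programming[i - 1]
--         else:
--             dynamic_programming[i] = dynamic_programming[i - 1] + dynamic_programming[i // 2]
--     return dynamic_programming[-1] % 10000000
-- ===== SOURCE B (Python) =====
-- def integer_breaking(num):
--     # Count partitions of num into powers of two by unbounded coin-change
--     # over the power-of-two denominations (mod taken once at the end).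
--     ways = [0] * (num + 1)
--     ways[0] = 1
--     p = 1
--     while p <= num:
--         for j in range(p, num + 1):
--             ways[j] += ways[j - p]
--         p *= 2
--     return ways[-1] % 10000000
-- ===== Notes on version B (the rewrite author's own statement) =====
-- stated objective: alternative
-- what changed: Replaces the binary halving recurrence dp[i]=dp[i-1](+dp[i//2]) with an unbounded coin-change count over the power-of-two denominations: an outer loop over denominations and an inner additive sweep ways[j]+=ways[j-p], mod applied once at the end.
import Mathlib
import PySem

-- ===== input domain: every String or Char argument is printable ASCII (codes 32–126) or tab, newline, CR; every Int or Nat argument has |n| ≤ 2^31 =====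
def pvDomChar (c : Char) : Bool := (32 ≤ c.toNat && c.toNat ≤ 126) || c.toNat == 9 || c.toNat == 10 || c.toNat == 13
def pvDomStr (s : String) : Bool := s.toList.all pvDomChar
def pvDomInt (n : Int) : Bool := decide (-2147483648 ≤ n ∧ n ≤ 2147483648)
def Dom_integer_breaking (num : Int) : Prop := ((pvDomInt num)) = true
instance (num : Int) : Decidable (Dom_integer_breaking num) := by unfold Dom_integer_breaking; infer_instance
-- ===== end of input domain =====

-- B replaces A's binary halving recurrence with an unbounded coin-change count over the
-- power-of-two denominations (objective: alternative; same values, not faster).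

-- ===== PORT A =====
-- loop body of A's 'for i in range(1, num + 1)'
def aStep (dp : List Int) (i : Int) : List Int :=
  if PySem.Int.mod i 2 = 1 then
    PySem.List.pySetD dp i (PySem.List.pyGetD dp (i - 1) 0)
  else
    PySem.List.pySetD dp i
      (PySem.List.pyGetD dp (i - 1) 0 + PySem.List.pyGetD dp (PySem.Int.floordiv i 2) 0)

def integer_breaking (num : Int) : Int :=
  let dp0 := (PySem.List.pyRange 0 (num + 1)).map (fun _ => (1 : Int))
  let dp := (PySem.List.pyRange 1 (num + 1)).foldl aStep dp0
  PySem.Int.mod (PySem.List.pyGetD dp (-1) 0) 10000000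

-- ===== PORT B =====
-- body of B's inner 'for j in range(p, num + 1): ways[j] += ways[j - p]'
def bStep (p : Int) (w : List Int) (j : Int) : List Int :=
  PySem.List.pySetD w j (PySem.List.pyGetD w j 0 + PySem.List.pyGetD w (j - p) 0)

def altSweep (p num : Int) (ways : List Int) : List Int :=
  (PySem.List.pyRange p (num + 1)).foldl (bStep p) ways

-- B's 'while p <= num' loop; the '1 ≤ p' conjunct is only a totality guard
-- (in Source B, p is always a positive power of two).
def altWhile (num p : Int) (ways : List Int) : List Int :=
  if h : 1 ≤ p ∧ p ≤ num then
    altWhile num (p * 2) (altSweep p num ways)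
  else ways
termination_by (num + 1 - p).toNat
decreasing_by omega

def integer_breaking_alt (num : Int) : Int :=
  let ways0 := PySem.List.pyRepeat [(0 : Int)] (num + 1)
  let ways1 := PySem.List.pySetD ways0 0 1
  PySem.Int.mod (PySem.List.pyGetD (altWhile num 1 ways1) (-1) 0) 10000000

-- ===== PRECONDITION & SPEC =====
-- On negative num both Pythons raise IndexError (empty dp / ways list); Pre_ excludes exactly those.
def Pre_integer_breaking (num : Int) : Prop := 0 ≤ num
instance (num : Int) : Decidable (Pre_integer_breaking num) := by unfold Pre_integer_breaking; infer_instance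

def pvWitness_integer_breaking : Int := 6

def Spec_integer_breaking (num : Int) (out : Int) : Prop := out = integer_breaking_alt num
instance (num : Int) (out : Int) : Decidable (Spec_integer_breaking num out) := by unfold Spec_integer_breaking; infer_instance

-- ===== CLAIM (what is proved, stated in full; the proofs are below) =====
def Claim_equal_integer_breaking : Prop := ∀ (num : Int), Dom_integer_breaking num → Pre_integer_breaking num → Spec_integer_breaking num (integer_breaking num)

-- ===== LEMMAS AND PROOFS =====

-- dRec j = A's dp[j]: the binary-partition recurrence.
def dRec : Nat → Int
  | 0 => 1
  | (n+1) => if (n+1) % 2 = 1 then dRec n else dRec n + dRec ((n+1)/2)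
decreasing_by all_goals omega

-- gRec k j = number of ways to write j as a sum of coins 2^0 … 2^(k-1) (gRec 0 = no coins).
def gRec : Nat → Nat → Int
  | 0, j => if j = 0 then 1 else 0
  | (k+1), j => gRec k j + if h : 2^k ≤ j then gRec (k+1) (j - 2^k) else 0
termination_by k j => (k, j)
decreasing_by
  · exact Prod.Lex.left _ _ (Nat.lt_succ_self k)
  · exact Prod.Lex.right _ (by have := Nat.two_pow_pos k; omega)

lemma gRec_succ (k j : Nat) :
    gRec (k+1) j = gRec k j + if 2^k ≤ j then gRec (k+1) (j - 2^k) else 0 := by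
  rw [gRec]; split
  · simp_all
  · simp_all

lemma gRec_zero (k : Nat) : gRec k 0 = 1 := by
  induction k with
  | zero => simp [gRec]
  | succ k ih =>
    have := Nat.two_pow_pos k
    rw [gRec_succ, ih, if_neg (by omega)]
    norm_num

lemma gRec_stable (k j : Nat) (h : j < 2^k) : gRec (k+1) j = gRec k j := by
  rw [gRec_succ, if_neg (by omega)]; ring

lemma gRec_one (j : Nat) : gRec 1 j = 1 := by
  induction j using Nat.strong_induction_on with
  | _ j ih =>
    rw [gRec_succ]
    rcases Nat.eq_zero_or_pos j with h | h
    · simp [h, gRec]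
    · rw [if_pos (by simpa using h)]
      simp [gRec, Nat.pos_iff_ne_zero.mp h, ih (j - 1) (by omega)]

lemma gRec_odd (k j : Nat) : gRec (k+1) (2*j+1) = gRec (k+1) (2*j) := by
  induction k generalizing j with
  | zero => rw [gRec_one, gRec_one]
  | succ k ihk =>
    induction j using Nat.strong_induction_on with
    | _ j ihj =>
      have hpow := Nat.two_pow_pos k
      have hp : 2^(k+1) = 2 * 2^k := by ring
      rw [gRec_succ (k+1) (2*j+1), gRec_succ (k+1) (2*j)]
      by_cases h : 2^k ≤ j
      · rw [if_pos (by omega), if_pos (by omega)]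
        have h1 : 2*j+1 - 2^(k+1) = 2*(j - 2^k) + 1 := by omega
        have h2 : 2*j - 2^(k+1) = 2*(j - 2^k) := by omega
        rw [h1, h2, ihj (j - 2^k) (by omega), ihk j]
      · rw [if_neg (by omega), if_neg (by omega), ihk j]

lemma gRec_bridge (k j : Nat) (hj : 1 ≤ j) :
    gRec (k+2) (2*j) = gRec (k+2) (2*j-1) + gRec (k+1) j := by
  induction k generalizing j with
  | zero =>
    induction j using Nat.strong_induction_on with
    | _ j ihj =>
      rw [gRec_one]
      rcases Nat.eq_or_lt_of_le hj with h1 | h2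
      · -- j = 1
        rw [← h1]
        rw [show 2*1 = 2 from rfl, show 2*1-1 = 1 from rfl]
        rw [gRec_succ 1 2, if_pos (by norm_num), gRec_one,
            gRec_succ 1 1, if_neg (by norm_num), gRec_one]
        norm_num [gRec_zero]
      · -- j ≥ 2
        have e1 : gRec 2 (2*j) = gRec 1 (2*j) + gRec 2 (2*(j-1)) := by
          rw [gRec_succ, if_pos (by omega), show 2*j - 2^1 = 2*(j-1) by omega]
        have e2 : gRec 2 (2*j-1) = gRec 1 (2*j-1) + gRec 2 (2*(j-1) - 1) := by
          rw [gRec_succ, if_pos (by omega), show 2*j-1 - 2^1 = 2*(j-1) - 1 by omega]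
        have ih := ihj (j-1) (by omega) (by omega)
        rw [e1, e2, ih, gRec_one, gRec_one, gRec_one]; ring
  | succ k ihk =>
    induction j using Nat.strong_induction_on with
    | _ j ihj =>
      have hpow := Nat.two_pow_pos (k+1)
      have hp : 2^(k+2) = 2 * 2^(k+1) := by ring
      rcases lt_trichotomy (2*j) (2^(k+2)) with hc | hc | hc
      · -- 2j < coin: stability everywhere
        rw [show k+1+2 = (k+2)+1 from rfl,
            gRec_stable (k+2) (2*j) (by omega),
            gRec_stable (k+2) (2*j-1) (by omega),
            show k+1+1 = (k+1)+1 from rfl,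
            gRec_stable (k+1) j (by omega),
            ihk j hj]
      · -- 2j = coin
        rw [show k+1+2 = (k+2)+1 from rfl]
        rw [gRec_succ (k+2) (2*j), if_pos (by omega)]
        rw [show 2*j - 2^(k+2) = 0 by omega, gRec_zero]
        rw [ihk j hj]
        rw [gRec_stable (k+2) (2*j-1) (by omega)]
        rw [show k+1+1 = (k+1)+1 from rfl, gRec_succ (k+1) j, if_pos (by omega)]
        rw [show j - 2^(k+1) = 0 by omega, gRec_zero]
        ring
      · -- 2j > coin
        rw [show k+1+2 = (k+2)+1 from rfl]
        rw [gRec_succ (k+2) (2*j), if_pos (by omega),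
            gRec_succ (k+2) (2*j-1), if_pos (by omega)]
        rw [show k+1+1 = (k+1)+1 from rfl, gRec_succ (k+1) j, if_pos (by omega)]
        have h1 : 2*j - 2^(k+2) = 2*(j - 2^(k+1)) := by omega
        have h2 : 2*j - 1 - 2^(k+2) = 2*(j - 2^(k+1)) - 1 := by omega
        rw [h1, h2, ihj (j - 2^(k+1)) (by omega) (by omega), ihk j hj]
        ring

lemma d_eq_g (j : Nat) : ∀ (k : Nat), j < 2^(k+1) → dRec j = gRec (k+1) j := by
  induction j using Nat.strong_induction_on with
  | _ j ihj =>
    intro k h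
    match j with
    | 0 => rw [dRec, gRec_zero]
    | (n+1) =>
      rw [dRec]
      by_cases hodd : (n+1) % 2 = 1
      · rw [if_pos hodd]
        obtain ⟨m, hm⟩ : ∃ m, n = 2*m := ⟨n/2, by omega⟩
        subst hm
        rw [ihj (2*m) (by omega) k (by omega), ← gRec_odd k m]
      · rw [if_neg hodd]
        obtain ⟨m, hm1, hm2⟩ : ∃ m, n+1 = 2*m ∧ 1 ≤ m := ⟨(n+1)/2, by omega, by omega⟩
        have hk : 1 ≤ k := by
          by_contra hk0
          interval_cases k <;> omega
        obtain ⟨k', rfl⟩ : ∃ k', k = k'+1 := ⟨k-1, by omega⟩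
        rw [hm1, gRec_bridge k' m hm2, show 2*m/2 = m by omega,
            show 2*m - 1 = n by omega]
        rw [ihj n (by omega) (k'+1) (by omega),
            ihj m (by omega) k' (by
              have : 2^(k'+2) = 2*2^(k'+1) := by ring
              omega)]

-- ((range N).map f).set m v, as a map again
lemma set_map_range {N m : Nat} (f : Nat → Int) (v : Int) :
    ((List.range N).map f).set m v
      = (List.range N).map (fun i => if i = m then v else f i) := by
  apply List.ext_getElem (by simp)
  intro i h1 h2
  rcases eq_or_ne i m with h | h
  · subst h
    simp
  · simp [h, Ne.symm h]

lemma pyRange_self (a : Int) : PySem.List.pyRange a a = [] := by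
  simp [PySem.List.pyRange]

-- ===== A side =====

lemma a_loop (n m : Nat) (hm : m ≤ n) :
    (PySem.List.pyRange 1 ((m : Int) + 1)).foldl aStep ((List.range (n+1)).map (fun _ => (1:Int)))
      = (List.range (n+1)).map (fun i => if i ≤ m then dRec i else 1) := by
  induction m with
  | zero =>
    have h : ((0:Nat) : Int) + 1 = 1 := by norm_num
    rw [h, pyRange_self]
    simp only [List.foldl_nil]
    apply List.map_congr_left
    intro i _
    rcases Nat.eq_zero_or_pos i with h | h
    · simp [h, dRec]
    · rw [if_neg (by omega)]
  | succ m ihm =>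
    have hcast : ((m+1 : Nat) : Int) + 1 = ((m:Int) + 1) + 1 := by push_cast; ring
    rw [hcast, PySem.List.pyRange_one_succ_right (by omega), List.foldl_append,
        ihm (by omega)]
    show aStep _ ((m:Int)+1) = _
    have hc1 : (m:Int) + 1 = ((m+1 : Nat) : Int) := by push_cast; ring
    have hgm : PySem.List.pyGetD ((List.range (n+1)).map (fun i => if i ≤ m then dRec i else 1)) (((m+1:Nat):Int) - 1) 0 = dRec m := by
      rw [show ((m+1:Nat):Int) - 1 = ((m:Nat):Int) by push_cast; ring,
          PySem.List.pyGetD_natCast, PySem.List.getD_map_range _ _ _ _ (by omega)]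
      simp
    have hmod : PySem.Int.mod ((m+1 : Nat) : Int) 2 = (((m+1) % 2 : Nat) : Int) := by
      exact_mod_cast PySem.Int.mod_natCast (m+1) 2
    have hfd : PySem.Int.floordiv ((m+1 : Nat) : Int) 2 = (((m+1) / 2 : Nat) : Int) := by
      exact_mod_cast PySem.Int.floordiv_natCast (m+1) 2
    unfold aStep
    rw [hc1, hgm, hmod, hfd, PySem.List.pySetD_natCast]
    by_cases hodd : (m+1) % 2 = 1
    · rw [if_pos (by exact_mod_cast hodd), set_map_range]
      apply List.map_congr_left
      intro i hi
      by_cases him : i = m+1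
      · rw [if_pos him, if_pos (by omega)]
        subst him
        rw [dRec, if_pos hodd]
      · rw [if_neg him]
        by_cases hle : i ≤ m
        · rw [if_pos hle, if_pos (by omega)]
        · rw [if_neg hle, if_neg (by omega)]
    · have hodd' : ¬ (((m+1) % 2 : Nat) : Int) = 1 := by exact_mod_cast hodd
      rw [if_neg hodd']
      have hm1 : 1 ≤ m := by omega
      rw [PySem.List.pyGetD_natCast, PySem.List.getD_map_range _ _ _ _ (by omega),
          if_pos (show (m+1)/2 ≤ m by omega), PySem.List.pySetD_natCast, set_map_range]
      apply List.map_congr_left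
      intro i hi
      by_cases him : i = m+1
      · rw [if_pos him, if_pos (by omega)]
        subst him
        rw [dRec, if_neg hodd]
      · rw [if_neg him]
        by_cases hle : i ≤ m
        · rw [if_pos hle, if_pos (by omega)]
        · rw [if_neg hle, if_neg (by omega)]

lemma a_value (n : Nat) : integer_breaking (n : Int) = PySem.Int.mod (dRec n) 10000000 := by
  show PySem.Int.mod (PySem.List.pyGetD ((PySem.List.pyRange 1 ((n:Int) + 1)).foldl aStep
      ((PySem.List.pyRange 0 ((n:Int) + 1)).map (fun _ => (1:Int)))) (-1) 0) 10000000 = _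
  have h0 : (PySem.List.pyRange 0 ((n:Int) + 1)).map (fun _ => (1:Int))
      = (List.range (n+1)).map (fun _ => (1:Int)) := by
    rw [show (n:Int) + 1 = ((n+1 : Nat) : Int) by push_cast; ring,
        PySem.List.pyRange_zero_natCast, List.map_map]
    rfl
  rw [h0, a_loop n n (le_refl n)]
  have hmap : (List.range (n+1)).map (fun i => if i ≤ n then dRec i else 1)
      = (List.range n).map (fun i => if i ≤ n then dRec i else 1) ++ [dRec n] := by
    rw [List.range_succ, List.map_append]
    simp
  rw [hmap, PySem.List.pyGetD_neg_one_append_singleton]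

-- ===== B side =====

lemma b_sweep_aux (k n : Nat) :
    ∀ (m : Nat), 2^k ≤ m → m ≤ n+1 →
    (PySem.List.pyRange ((2^k : Nat) : Int) ((m : Nat) : Int)).foldl
        (bStep ((2^k : Nat) : Int)) ((List.range (n+1)).map (gRec k))
      = (List.range (n+1)).map (fun i => if i < m then gRec (k+1) i else gRec k i) := by
  intro m h1 h2
  induction m, h1 using Nat.le_induction with
  | base =>
    rw [pyRange_self]
    simp only [List.foldl_nil]
    apply List.map_congr_left
    intro i hi
    by_cases h : i < 2^k
    · rw [if_pos h, gRec_stable k i h]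
    · rw [if_neg h]
  | succ m h1 ihm =>
    have hpos := Nat.two_pow_pos k
    rw [show ((m+1 : Nat) : Int) = ((m:Nat):Int) + 1 by push_cast; ring,
        PySem.List.pyRange_one_succ_right (by exact_mod_cast h1), List.foldl_append,
        ihm (by omega)]
    show bStep _ _ ((m:Nat):Int) = _
    unfold bStep
    have hgj : PySem.List.pyGetD ((List.range (n+1)).map (fun i => if i < m then gRec (k+1) i else gRec k i)) ((m:Nat):Int) 0 = gRec k m := by
      rw [PySem.List.pyGetD_natCast, PySem.List.getD_map_range _ _ _ _ (by omega)]
      rw [if_neg (by omega)]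
    have hsub : ((m:Nat):Int) - ((2^k : Nat) : Int) = ((m - 2^k : Nat) : Int) := by omega
    have hgjp : PySem.List.pyGetD ((List.range (n+1)).map (fun i => if i < m then gRec (k+1) i else gRec k i)) (((m - 2^k : Nat)) : Int) 0 = gRec (k+1) (m - 2^k) := by
      rw [PySem.List.pyGetD_natCast, PySem.List.getD_map_range _ _ _ _ (by omega)]
      rw [if_pos (by omega)]
    rw [hgj, hsub, hgjp, PySem.List.pySetD_natCast, set_map_range]
    apply List.map_congr_left
    intro i hi
    by_cases him : i = m
    · rw [if_pos him, if_pos (by omega)]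
      subst him
      rw [gRec_succ k i, if_pos (by omega)]
    · rw [if_neg him]
      by_cases hlt : i < m
      · rw [if_pos hlt, if_pos (by omega)]
      · rw [if_neg hlt, if_neg (by omega)]

lemma b_sweep (k n : Nat) (hn : 2^k ≤ n) :
    altSweep ((2^k : Nat) : Int) (n : Int) ((List.range (n+1)).map (gRec k))
      = (List.range (n+1)).map (gRec (k+1)) := by
  unfold altSweep
  rw [show (n:Int) + 1 = ((n+1 : Nat) : Int) by push_cast; ring,
      b_sweep_aux k n (n+1) (by omega) (le_refl _)]
  apply List.map_congr_left
  intro i hi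
  rw [if_pos (by simp at hi; omega)]

lemma b_while (fuel n : Nat) : ∀ (k : Nat), n + 1 - 2^k ≤ fuel →
    ∃ K, k ≤ K ∧ n < 2^K ∧
      altWhile (n : Int) ((2^k : Nat) : Int) ((List.range (n+1)).map (gRec k))
        = (List.range (n+1)).map (gRec K) := by
  induction fuel with
  | zero =>
    intro k hf
    have hpos := Nat.two_pow_pos k
    refine ⟨k, le_refl _, by omega, ?_⟩
    rw [altWhile, dif_neg (by
      intro hcon
      have : (2:Nat)^k ≤ n := by exact_mod_cast hcon.2
      omega)]
  | succ fuel ih =>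
    intro k hf
    have hpos := Nat.two_pow_pos k
    by_cases h : 2^k ≤ n
    · rw [altWhile, dif_pos ⟨by exact_mod_cast Nat.one_le_two_pow, by exact_mod_cast h⟩]
      rw [b_sweep k n h,
          show ((2^k : Nat) : Int) * 2 = ((2^(k+1) : Nat) : Int) by push_cast; ring]
      have hp2 : 2^(k+1) = 2*2^k := by ring
      obtain ⟨K, hK1, hK2, hK3⟩ := ih (k+1) (by omega)

      exact ⟨K, by omega, hK2, hK3⟩
    · refine ⟨k, le_refl _, by omega, ?_⟩
      rw [altWhile, dif_neg (by
        intro hcon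
        have : (2:Nat)^k ≤ n := by exact_mod_cast hcon.2
        omega)]

lemma b_value (n : Nat) : integer_breaking_alt (n : Int) = PySem.Int.mod (dRec n) 10000000 := by
  show PySem.Int.mod (PySem.List.pyGetD (altWhile (n:Int) 1
      (PySem.List.pySetD (PySem.List.pyRepeat [(0:Int)] ((n:Int) + 1)) 0 1)) (-1) 0) 10000000 = _
  have hinit : PySem.List.pySetD (PySem.List.pyRepeat [(0:Int)] ((n:Int) + 1)) 0 1
      = (List.range (n+1)).map (gRec 0) := by
    rw [PySem.List.pyRepeat_singleton, show ((n:Int)+1).toNat = n+1 by omega,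
        PySem.List.pySetD_of_nonneg _ _ (by norm_num)]
    apply List.ext_getElem (by simp)
    intro i h1 h2
    rcases Nat.eq_zero_or_pos i with h | h
    · subst h
      simp [gRec]
    · simp only [List.getElem_set, List.getElem_map, List.getElem_range,
        List.getElem_replicate]
      rw [if_neg (by omega), show gRec 0 i = if i = 0 then 1 else 0 from by rw [gRec],
          if_neg (by omega)]
  rw [hinit]
  obtain ⟨K, hK1, hK2, hK3⟩ := b_while (n+1) n 0 (by norm_num)
  norm_num at hK3
  rw [hK3, List.range_succ, List.map_append, List.map_cons, List.map_nil,
      PySem.List.pyGetD_neg_one_append_singleton]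
  congr 1
  match K, hK2 with
  | 0, hK2 =>
    rw [show n = 0 by omega, dRec, gRec_zero]
  | (K'+1), hK2 =>
    rw [d_eq_g n K' hK2]

-- ===== VERDICT (by name: the statement is the Claim_ definition above) =====
theorem integer_breaking_spec : Claim_equal_integer_breaking := by
  intro num _ hpre
  have hn : num = ((num.toNat : Nat) : Int) := by
    have := Int.toNat_of_nonneg hpre; omega
  show integer_breaking num = integer_breaking_alt num
  rw [hn, a_value, b_value]
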